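-- pv_equiv track=rewrite | github.com/kevin-quiroz/Sintaxis | AguAFD.py | automataSuma
-- ===== SOURCE A (Python) =====
-- ESTADO_FINAL = "ESTADO FINAL"
--
-- ESTADO_NO_FINAL = "NO ACEPTADO"
--
-- ESTADO_TRAMPA = "EN ESTADO TRAMPA"
--
-- def automataSuma(lexema):
--     estado = 0
--     estadoFinal = [1]
--     for caracter in lexema:
--         if estado == 0 and (caracter == "+" or caracter == "-"):
--             estado = 1
--         else:
--             estado = -1
--             break
--     if estado == -1:
--         return ESTADO_TRAMPA
--     elif estado in estadoFinal:
--         return ESTADO_FINAL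
--     else:
--         return ESTADO_NO_FINAL
-- ===== SOURCE B (Python) =====
-- ESTADO_FINAL = "ESTADO FINAL"
--
-- ESTADO_NO_FINAL = "NO ACEPTADO"
--
-- ESTADO_TRAMPA = "EN ESTADO TRAMPA"
--
-- def automataSuma(lexema):
--     if len(lexema) == 0:
--         return ESTADO_NO_FINAL
--     if len(lexema) == 1 and lexema[0] in ("+", "-"):
--         return ESTADO_FINAL
--     return ESTADO_TRAMPA
-- ===== Notes on version B (the rewrite author's own statement) =====
-- stated objective: simpler
-- what changed: Replaces the state-machine loop with a closed-form decision on the lexeme's length and first character (empty -> NO ACEPTADO, single +/- -> ESTADO FINAL, anything else -> EN ESTADO TRAMPA).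
import Mathlib
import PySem

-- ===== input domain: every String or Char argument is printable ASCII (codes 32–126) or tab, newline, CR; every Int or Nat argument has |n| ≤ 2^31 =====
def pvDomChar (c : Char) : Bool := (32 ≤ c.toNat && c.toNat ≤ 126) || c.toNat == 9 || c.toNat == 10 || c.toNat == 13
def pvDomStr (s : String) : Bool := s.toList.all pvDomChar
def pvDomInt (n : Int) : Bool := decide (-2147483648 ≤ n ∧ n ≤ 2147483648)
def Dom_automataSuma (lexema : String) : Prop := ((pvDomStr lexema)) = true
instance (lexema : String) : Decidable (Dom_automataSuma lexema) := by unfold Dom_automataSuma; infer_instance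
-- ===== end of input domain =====

-- B replaces A's state-machine loop by a closed-form decision on length and first character (objective: simpler).

-- ===== PORT A =====
-- A's for-loop with break, carried as structural recursion over the characters with the estado accumulator.
def automataSumaLoop (estado : Int) (cs : List Char) : Int :=
  match cs with
  | [] => estado
  | c :: rest =>
      if estado = 0 ∧ (c = '+' ∨ c = '-') then automataSumaLoop 1 rest
      else -1  -- estado = -1; break

def automataSuma (lexema : String) : String :=
  let estado := automataSumaLoop 0 lexema.toList
  let estadoFinal : List Int := [1]
  if estado = -1 then "EN ESTADO TRAMPA"
  else if estado ∈ estadoFinal then "ESTADO FINAL"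
  else "NO ACEPTADO"

-- ===== PORT B =====
def automataSuma_alt (lexema : String) : String :=
  if PySem.Str.len lexema = 0 then "NO ACEPTADO"
  else if PySem.Str.len lexema = 1 ∧ (PySem.Str.pyGet? lexema 0 = some '+' ∨ PySem.Str.pyGet? lexema 0 = some '-')
    then "ESTADO FINAL"
  else "EN ESTADO TRAMPA"

-- ===== PRECONDITION & SPEC =====
def Spec_automataSuma (lexema : String) (out : String) : Prop := out = automataSuma_alt lexema
instance (lexema : String) (out : String) : Decidable (Spec_automataSuma lexema out) := by unfold Spec_automataSuma; infer_instance

-- ===== CLAIM (what is proved, stated in full; the proofs are below) =====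
def Claim_equal_automataSuma : Prop := ∀ (lexema : String), Dom_automataSuma lexema → Spec_automataSuma lexema (automataSuma lexema)

-- ===== LEMMAS AND PROOFS =====
theorem automataSuma_eq_alt (lexema : String) :
    automataSuma lexema = automataSuma_alt lexema := by
  rcases h : lexema.toList with _ | ⟨c, _ | ⟨d, rest⟩⟩
  · simp [automataSuma, automataSuma_alt, automataSumaLoop, PySem.Str.len, h]
  · simp only [automataSuma, automataSuma_alt, automataSumaLoop, PySem.Str.len,
      PySem.Str.pyGet?, h]
    by_cases hc : c = '+' ∨ c = '-' <;> simp_all [PySem.List.pyGet?, PySem.List.pyIdx?]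
  · simp only [automataSuma, automataSuma_alt, automataSumaLoop, PySem.Str.len, h]
    by_cases hc : c = '+' ∨ c = '-' <;> simp_all <;> [skip; omega]
    rw [if_neg (by omega), if_neg (by omega)]

-- ===== VERDICT (by name: the statement is the Claim_ definition above) =====
theorem automataSuma_spec : Claim_equal_automataSuma :=
  fun lexema _ => automataSuma_eq_alt lexema
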